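/- GENERATED by c/gen_decode.py: decode facts of the image, one per distinct instruction byte string. -/
import UserX.DecodeImage

#decode_all Vorbis.Dec
  "018170050000"  -- add DWORD PTR [rcx+0x570],eax
  "0f573dda650100"  -- xorps xmm7,XMMWORD PTR [rip+0x165da]
  "0f84aa000000"  -- je 114d86
  "0f85bf000000"  -- jne 113e3f
  "0f8e0bfeffff"  -- jle 114668
  "0fb6430c"  -- movzx eax,BYTE PTR [rbx+0xc]
  "29c2"  -- sub edx,eax
  "3dff030000"  -- cmp eax,0x3ff
  "410fb75c5d02"  -- movzx ebx,WORD PTR [r13+rbx*2+0x2]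
  "4183c501"  -- add r13d,0x1
  "4189ce"  -- mov r14d,ecx
  "418d7703"  -- lea esi,[r15+0x3]
  "41f7fd"  -- idiv r13d
  "4429e0"  -- sub eax,r12d
  "4488a335060000"  -- mov BYTE PTR [rbx+0x635],r12b
  "4489add0010000"  -- mov DWORD PTR [rbp+0x1d0],r13d
  "448b6c2440"  -- mov r13d,DWORD PTR [rsp+0x40]
  "448d7801"  -- lea r15d,[rax+0x1]
  "45896710"  -- mov DWORD PTR [r15+0x10],r12d
  "458d742401"  -- lea r14d,[r12+0x1]
  "4829c6"  -- sub rsi,rax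
  "4869d248080000"  -- imul rdx,rdx,0x848
  "4883eb20"  -- sub rbx,0x20
  "48897c2408"  -- mov QWORD PTR [rsp+0x8],rdi
  "488b442440"  -- mov rax,QWORD PTR [rsp+0x40]
  "488b9578ffffff"  -- mov rdx,QWORD PTR [rbp-0x88]
  "488d5c2410"  -- lea rbx,[rsp+0x10]
  "488d7d10"  -- lea rdi,[rbp+0x10]
  "488dbb54010000"  -- lea rdi,[rbx+0x154]
  "488dbd98000000"  -- lea rdi,[rbp+0x98]
  "48c7442418000d1200"  -- mov QWORD PTR [rsp+0x18],0x120d00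
  "49039f38010000"  -- add rbx,QWORD PTR [r15+0x138]
  "49895e20"  -- mov QWORD PTR [r14+0x20],rbx
  "498d7c1f31"  -- lea rdi,[r15+rbx*1+0x31]
  "498dbc47b4000000"  -- lea rdi,[r15+rax*2+0xb4]
  "4a8d1cbd00000000"  -- lea rbx,[r15*4+0x0]
  "4c036b08"  -- add r13,QWORD PTR [rbx+0x8]
  "4c896dc0"  -- mov QWORD PTR [rbp-0x40],r13
  "4c8b6d90"  -- mov r13,QWORD PTR [rbp-0x70]
  "4c8d6c2430"  -- lea r13,[rsp+0x30]
  "4d89c5"  -- mov r13,r8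
  "4e8d6ca804"  -- lea r13,[rax+r13*4+0x4]
  "660fefe4"  -- pxor xmm4,xmm4
  "664489a354010000"  -- mov WORD PTR [rbx+0x154],r12w
  "7405"  -- je 116745
  "7484"  -- je 10452a
  "75e2"  -- jne 10ee36
  "7d2d"  -- jge 104a53
  "7f2d"  -- jg 103545
  "81ffff030000"  -- cmp edi,0x3ff
  "83f805"  -- cmp eax,0x5
  "8954241c"  -- mov DWORD PTR [rsp+0x1c],edx
  "89c6"  -- mov esi,eax
  "8b4c240c"  -- mov ecx,DWORD PTR [rsp+0xc]
  "8b8424c00b0000"  -- mov eax,DWORD PTR [rsp+0xbc0]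
  "8d78ff"  -- lea edi,[rax-0x1]
  "bf36000000"  -- mov edi,0x36
  "c744244800000000"  -- mov DWORD PTR [rsp+0x48],0x0
  "c784ac8002000000000000"  -- mov DWORD PTR [rsp+rbp*4+0x280],0x0
  "e8074affff"  -- call 100720
  "e810a9feff"  -- call 100640
  "e81a6dffff"  -- call 100720
  "e82490ffff"  -- call 100800
  "e82d46ffff"  -- call 108f20
  "e83749ffff"  -- call 108f20
  "e842fdffff"  -- call 107500
  "e84d20ffff"  -- call 100640
  "e85744ffff"  -- call 108dc0
  "e865bffeff"  -- call 100640
  "e87035ffff"  -- call 100300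
  "e87ad5feff"  -- call 100720
  "e88767ffff"  -- call 100640
  "e890a6ffff"  -- call 100640
  "e89a85ffff"  -- call 10d1c0
  "e8a5bbfeff"  -- call 101520
  "e8afb9feff"  -- call 100800
  "e8b8deffff"  -- call 10d5c0
  "e8c396ffff"  -- call 100800
  "e8ccaefeff"  -- call 100640
  "e8d77effff"  -- call 10d1c0
  "e8e19bffff"  -- call 100640
  "e8eb56ffff"  -- call 100800
  "e8f2a9feff"  -- call 100640
  "e8fdd6feff"  -- call 100640
  "e93affffff"  -- jmp 10798e
  "e985000000"  -- jmp 10be43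
  "e9dc010000"  -- jmp 10de09
  "eb45"  -- jmp 10986b
  "ebca"  -- jmp 1138a4
  "f20f2ac0"  -- cvtsi2sd xmm0,eax
  "f20f5ad8"  -- cvtsd2ss xmm3,xmm0
  "f30f1045a8"  -- movss xmm0,DWORD PTR [rbp-0x58]
  "f30f106c2404"  -- movss xmm5,DWORD PTR [rsp+0x4]
  "f30f1145fc"  -- movss DWORD PTR [rbp-0x4],xmm0
  "f30f116c2404"  -- movss DWORD PTR [rsp+0x4],xmm5
  "f30f584c2418"  -- addss xmm1,DWORD PTR [rsp+0x18]
  "f30f59c1"  -- mulss xmm0,xmm1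
  "f30f5cee"  -- subss xmm5,xmm6
  "f3410f114f0c"  -- movss DWORD PTR [r15+0xc],xmm1
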